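-- pv_equiv track=rewrite | github.com/WilShi/ScholarMind_MAS | scholarmind/agents/methodology_agent.py | _build_methodology_context
-- ===== SOURCE A (Python) =====
-- def _build_methodology_context(metadata: dict, sections: list) -> str:
--     """Build context string for LLM from paper methodology sections"""
--     context_parts = []
--
--     # Add title and abstract
--     if metadata.get("title"):
--         context_parts.append(f"Title: {metadata['title']}\n")
--
--     if metadata.get("abstract"):
--         context_parts.append(f"\nAbstract:\n{metadata['abstract']}\n")
--
--     # Focus on methodology-related sections
--     context_parts.append("\nMethodology Sections:\n")
--     methodology_types = ["methodology", "method", "approach", "model", "algorithm", "architecture"]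
--
--     for section in sections:
--         section_title = section.get("title", "").lower()
--         section_type = section.get("section_type", "").lower()
--         section_content = section.get("content", "")
--
--         # Check if this is a methodology-related section
--         if section_type in methodology_types or any(kw in section_title for kw in methodology_types):
--             # Truncate long sections
--             if len(section_content) > 1000:
--                 section_content = section_content[:1000] + "..."
--             context_parts.append(f"\n## {section.get('title', 'Untitled')}\n{section_content}\n")
--
--     # Also include related work sections for comparison
--     for section in sections:
--         section_type = section.get("section_type", "").lower()
--         section_title = section.get("title", "").lower()
--         section_content = section.get("content", "")
--
--         if section_type == "related_work" or "related work" in section_title: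
--             if len(section_content) > 500:
--                 section_content = section_content[:500] + "..."
--             context_parts.append(f"\n## Related Work\n{section_content}\n")
--             break
--
--     return "".join(context_parts)
-- ===== SOURCE B (Python) =====
-- def _build_methodology_context(metadata: dict, sections: list) -> str:
--     """Build context string for LLM from paper methodology sections (single pass)."""
--     methodology_types = ["methodology", "method", "approach", "model", "algorithm", "architecture"]
--
--     header = ""
--     if metadata.get("title"):
--         header += f"Title: {metadata['title']}\n"
--     if metadata.get("abstract"):
--         header += f"\nAbstract:\n{metadata['abstract']}\n"
--     header += "\nMethodology Sections:\n"
--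
--     methodology_parts = []
--     related = None
--     for section in sections:
--         title_lower = section.get("title", "").lower()
--         section_type = section.get("section_type", "").lower()
--         content = section.get("content", "")
--
--         if section_type in methodology_types or any(kw in title_lower for kw in methodology_types):
--             body = content[:1000] + "..." if len(content) > 1000 else content
--             methodology_parts.append(f"\n## {section.get('title', 'Untitled')}\n{body}\n")
--
--         if related is None and (section_type == "related_work" or "related work" in title_lower):
--             body = content[:500] + "..." if len(content) > 500 else content
--             related = f"\n## Related Work\n{body}\n"
--
--     return header + "".join(methodology_parts) + (related if related is not None else "")
-- ===== Notes on version B (the rewrite author's own statement) =====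
-- stated objective: alternative
-- what changed: Replaces A's two separate scans over sections (one collecting methodology blocks into the shared parts list, a second break-on-first scan for related work) with a single pass that partitions into a methodology-parts list and an at-most-once captured related-work string, and builds the title/abstract header as a string instead of list parts joined at the end.
import Mathlib
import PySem

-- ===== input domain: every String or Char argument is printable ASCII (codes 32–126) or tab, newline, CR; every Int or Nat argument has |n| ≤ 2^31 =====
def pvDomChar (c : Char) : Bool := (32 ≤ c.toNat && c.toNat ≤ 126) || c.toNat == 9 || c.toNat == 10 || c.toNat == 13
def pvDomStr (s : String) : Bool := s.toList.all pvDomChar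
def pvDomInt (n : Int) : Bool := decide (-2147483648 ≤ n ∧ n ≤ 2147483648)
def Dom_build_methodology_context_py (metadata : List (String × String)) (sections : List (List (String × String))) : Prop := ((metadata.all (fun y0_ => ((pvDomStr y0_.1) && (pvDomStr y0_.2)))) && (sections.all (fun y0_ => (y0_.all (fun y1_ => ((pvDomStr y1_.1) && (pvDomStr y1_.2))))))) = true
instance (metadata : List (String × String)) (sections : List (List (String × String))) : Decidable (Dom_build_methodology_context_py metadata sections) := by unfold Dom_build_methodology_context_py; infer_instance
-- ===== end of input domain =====

-- B makes one pass over the sections (partitioning into methodology parts and the first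
-- related-work block) instead of A's two loops, and accumulates the header as a string;
-- objective: alternative decomposition, same cost.

-- dict.get(k, dflt) on an association list: first match (shared lookup helper)
def pvGetD (d : List (String × String)) (k dflt : String) : String :=
  match d.find? (fun p => p.1 == k) with
  | some p => p.2
  | none => dflt

def pvMethTypes : List String :=
  ["methodology", "method", "approach", "model", "algorithm", "architecture"]

-- ===== PORT A =====
-- second loop of A: scan with break, appending one related-work block
def pvRelLoopA : List (List (String × String)) → List String → List String
  | [], parts => parts
  | s :: rest, parts =>
    let st := PySem.Str.lower (pvGetD s "section_type" "")
    let tl := PySem.Str.lower (pvGetD s "title" "")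
    let content := pvGetD s "content" ""
    if st == "related_work" || PySem.Str.isIn "related work" tl then
      let c := if PySem.Str.len content > 500 then PySem.Str.slice content none (some 500) ++ "..." else content
      parts ++ ["\n## Related Work\n" ++ c ++ "\n"]
    else pvRelLoopA rest parts

def build_methodology_context_py (metadata : List (String × String)) (sections : List (List (String × String))) : String :=
  let parts0 : List String := []
  let parts1 := if pvGetD metadata "title" "" != "" then parts0 ++ ["Title: " ++ pvGetD metadata "title" "" ++ "\n"] else parts0
  let parts2 := if pvGetD metadata "abstract" "" != "" then parts1 ++ ["\nAbstract:\n" ++ pvGetD metadata "abstract" "" ++ "\n"] else parts1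
  let parts3 := parts2 ++ ["\nMethodology Sections:\n"]
  let parts4 := sections.foldl (fun parts s =>
    let tl := PySem.Str.lower (pvGetD s "title" "")
    let st := PySem.Str.lower (pvGetD s "section_type" "")
    let content := pvGetD s "content" ""
    if pvMethTypes.contains st || pvMethTypes.any (fun kw => PySem.Str.isIn kw tl) then
      let c := if PySem.Str.len content > 1000 then PySem.Str.slice content none (some 1000) ++ "..." else content
      parts ++ ["\n## " ++ pvGetD s "title" "Untitled" ++ "\n" ++ c ++ "\n"]
    else parts) parts3
  let parts5 := pvRelLoopA sections parts4
  PySem.Str.join "" parts5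

-- ===== PORT B =====
-- single pass: accumulate methodology blocks and (at most one) related-work block
def pvLoopB : List (List (String × String)) → List String × Option String → List String × Option String
  | [], acc => acc
  | s :: rest, acc =>
    let tl := PySem.Str.lower (pvGetD s "title" "")
    let st := PySem.Str.lower (pvGetD s "section_type" "")
    let content := pvGetD s "content" ""
    let acc1 :=
      if pvMethTypes.contains st || pvMethTypes.any (fun kw => PySem.Str.isIn kw tl) then
        let body := if PySem.Str.len content > 1000 then PySem.Str.slice content none (some 1000) ++ "..." else content
        (acc.1 ++ ["\n## " ++ pvGetD s "title" "Untitled" ++ "\n" ++ body ++ "\n"], acc.2)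
      else acc
    let acc2 :=
      if acc1.2.isNone && (st == "related_work" || PySem.Str.isIn "related work" tl) then
        let body := if PySem.Str.len content > 500 then PySem.Str.slice content none (some 500) ++ "..." else content
        (acc1.1, some ("\n## Related Work\n" ++ body ++ "\n"))
      else acc1
    pvLoopB rest acc2

def build_methodology_context_py_alt (metadata : List (String × String)) (sections : List (List (String × String))) : String :=
  let header0 : String := ""
  let header1 := if pvGetD metadata "title" "" != "" then header0 ++ "Title: " ++ pvGetD metadata "title" "" ++ "\n" else header0
  let header2 := if pvGetD metadata "abstract" "" != "" then header1 ++ "\nAbstract:\n" ++ pvGetD metadata "abstract" "" ++ "\n" else header1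
  let header := header2 ++ "\nMethodology Sections:\n"
  let acc := pvLoopB sections ([], none)
  header ++ PySem.Str.join "" acc.1 ++ acc.2.getD ""

-- ===== PRECONDITION & SPEC =====
def Spec_build_methodology_context_py (metadata : List (String × String)) (sections : List (List (String × String))) (out : String) : Prop := out = build_methodology_context_py_alt metadata sections
instance (metadata : List (String × String)) (sections : List (List (String × String))) (out : String) : Decidable (Spec_build_methodology_context_py metadata sections out) := by unfold Spec_build_methodology_context_py; infer_instance

-- ===== CLAIM (what is proved, stated in full; the proofs are below) =====
def Claim_equal_build_methodology_context_py : Prop := ∀ (metadata : List (String × String)) (sections : List (List (String × String))), Dom_build_methodology_context_py metadata sections → Spec_build_methodology_context_py metadata sections (build_methodology_context_py metadata sections)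

-- ===== LEMMAS AND PROOFS =====

def pvMethPred (s : List (String × String)) : Bool :=
  pvMethTypes.contains (PySem.Str.lower (pvGetD s "section_type" "")) ||
    pvMethTypes.any (fun kw => PySem.Str.isIn kw (PySem.Str.lower (pvGetD s "title" "")))

def pvMethBlock (s : List (String × String)) : String :=
  let content := pvGetD s "content" ""
  let c := if PySem.Str.len content > 1000 then PySem.Str.slice content none (some 1000) ++ "..." else content
  "\n## " ++ pvGetD s "title" "Untitled" ++ "\n" ++ c ++ "\n"

def pvRelPred (s : List (String × String)) : Bool :=
  PySem.Str.lower (pvGetD s "section_type" "") == "related_work" ||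
    PySem.Str.isIn "related work" (PySem.Str.lower (pvGetD s "title" ""))

def pvRelBlock (s : List (String × String)) : String :=
  let content := pvGetD s "content" ""
  let c := if PySem.Str.len content > 500 then PySem.Str.slice content none (some 500) ++ "..." else content
  "\n## Related Work\n" ++ c ++ "\n"

def pvMB (secs : List (List (String × String))) : List String :=
  (secs.filter pvMethPred).map pvMethBlock

def pvRel (secs : List (List (String × String))) : Option String :=
  (secs.find? pvRelPred).map pvRelBlock

-- step equations of the two loops, restated through the named predicate/block helpers (all rfl)
theorem pv_stepA_eq :
    (fun (parts : List String) (s : List (String × String)) =>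
      let tl := PySem.Str.lower (pvGetD s "title" "")
      let st := PySem.Str.lower (pvGetD s "section_type" "")
      let content := pvGetD s "content" ""
      if pvMethTypes.contains st || pvMethTypes.any (fun kw => PySem.Str.isIn kw tl) then
        let c := if PySem.Str.len content > 1000 then PySem.Str.slice content none (some 1000) ++ "..." else content
        parts ++ ["\n## " ++ pvGetD s "title" "Untitled" ++ "\n" ++ c ++ "\n"]
      else parts) =
    (fun parts s => if pvMethPred s then parts ++ [pvMethBlock s] else parts) := rfl

theorem pv_relA_cons (s : List (String × String)) (rest : List (List (String × String))) (parts : List String) :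
    pvRelLoopA (s :: rest) parts =
      if pvRelPred s then parts ++ [pvRelBlock s] else pvRelLoopA rest parts := rfl

theorem pv_loopB_cons (s : List (String × String)) (rest : List (List (String × String))) (parts : List String) (o : Option String) :
    pvLoopB (s :: rest) (parts, o) =
      pvLoopB rest
        (let acc1 := if pvMethPred s then (parts ++ [pvMethBlock s], o) else (parts, o)
         if acc1.2.isNone && pvRelPred s then (acc1.1, some (pvRelBlock s)) else acc1) := rfl

-- "".join lemmas
theorem pv_inter (x : List Char) (xs : List (List Char)) :
    (List.intersperse [] (x :: xs)).flatten = x ++ (List.intersperse [] xs).flatten := by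
  cases xs <;> simp [List.intersperse]

theorem pv_join_cons (x : String) (xs : List String) :
    PySem.Str.join "" (x :: xs) = x ++ PySem.Str.join "" xs := by
  simp [PySem.Str.join, PySem.Chars.join, List.intercalate, pv_inter]

theorem pv_join_nil : PySem.Str.join "" ([] : List String) = "" := rfl

theorem pv_join_append (xs ys : List String) :
    PySem.Str.join "" (xs ++ ys) = PySem.Str.join "" xs ++ PySem.Str.join "" ys := by
  induction xs with
  | nil => simp [pv_join_nil]
  | cons x xs ih => simp [pv_join_cons, ih, String.append_assoc]

-- merging of adjacent string literals (A joins parts, B pre-concatenates the header)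
theorem pv_lit1 : ("\n" ++ "\nAbstract:\n" : String) = "\n\nAbstract:\n" := by decide

theorem pv_lit2 : ("\n" ++ "\nMethodology Sections:\n" : String) = "\n\nMethodology Sections:\n" := by decide

theorem pv_m1 (x : String) : "\n" ++ ("\nAbstract:\n" ++ x) = "\n\nAbstract:\n" ++ x := by
  rw [← String.append_assoc, pv_lit1]

theorem pv_m2 (x : String) : "\n" ++ ("\nMethodology Sections:\n" ++ x) = "\n\nMethodology Sections:\n" ++ x := by
  rw [← String.append_assoc, pv_lit2]

-- loop characterisations
theorem pv_foldA (secs : List (List (String × String))) (parts : List String) :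
    secs.foldl (fun parts s => if pvMethPred s then parts ++ [pvMethBlock s] else parts) parts
      = parts ++ pvMB secs := by
  induction secs generalizing parts with
  | nil => simp [pvMB]
  | cons s rest ih =>
    simp only [List.foldl_cons, ih, pvMB, List.filter_cons]
    by_cases h : pvMethPred s = true <;> simp [h, List.append_assoc]

theorem pv_relA (secs : List (List (String × String))) (parts : List String) :
    pvRelLoopA secs parts = parts ++ (pvRel secs).toList := by
  induction secs generalizing parts with
  | nil => simp [pvRelLoopA, pvRel]
  | cons s rest ih =>
    rw [pv_relA_cons]
    by_cases h : pvRelPred s = true <;>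
      simp [h, ih, pvRel, Option.toList]

theorem pv_loopB (secs : List (List (String × String))) (parts : List String) (o : Option String) :
    pvLoopB secs (parts, o) = (parts ++ pvMB secs, o.or (pvRel secs)) := by
  induction secs generalizing parts o with
  | nil => simp [pvLoopB, pvMB, pvRel]
  | cons s rest ih =>
    rw [pv_loopB_cons]
    by_cases hm : pvMethPred s = true <;> by_cases hr : pvRelPred s = true <;> cases o <;>
      simp [hm, hr, ih, pvMB, pvRel, Option.or, List.append_assoc]

-- ===== VERDICT (by name: the statement is the Claim_ definition above) =====
theorem build_methodology_context_py_spec : Claim_equal_build_methodology_context_py := by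
  intro metadata sections _
  unfold Spec_build_methodology_context_py
  simp only [build_methodology_context_py, build_methodology_context_py_alt]
  rw [pv_stepA_eq, pv_foldA, pv_relA, pv_loopB]
  simp only [Option.none_or, List.nil_append]
  rcases pvRel sections with _ | b <;> split_ifs <;>
    simp [pv_join_append, pv_join_cons, pv_join_nil, String.append_assoc, Option.toList, pv_m1, pv_m2]
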